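-- pv_equiv track=rewrite | github.com/ZoyaV/wfslib | wfslib/_wfs.py | points2grid
-- ===== SOURCE A (Python) =====
-- def points2grid(x_points, y_points):
--     cell = []
--     cells = []
--
--     for i in range(0,len(x_points),2):
--         for j in range(0,len(y_points),2):
--             cell = [(x_points[i], x_points[i+1],x_points[i],x_points[i+1]),
--                     (y_points[j],y_points[j], y_points[j+1],y_points[j+1])]
--             cells.append(cell)
--
--     return cells
-- ===== SOURCE B (Python) =====
-- def points2grid(x_points, y_points):
--     def row(xt, ys):
--         if len(ys) < 2:
--             return []
--         c, d = ys[0], ys[1]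
--         return [[xt, (c, c, d, d)]] + row(xt, ys[2:])
--
--     def go(xs):
--         if len(xs) < 2:
--             return []
--         a, b = xs[0], xs[1]
--         return row((a, b, a, b), y_points) + go(xs[2:])
--
--     return go(x_points)
-- ===== Notes on version B (the rewrite author's own statement) =====
-- stated objective: alternative
-- what changed: B replaces A's nested index loops over range(0,len,2) with structural recursion that consumes the lists two elements at a time (an inner recursion builds one row of cells per x-pair, an outer recursion over x-pairs concatenates the rows), with no indexing at all; same O(nx*ny) output cost.
import Mathlib
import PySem

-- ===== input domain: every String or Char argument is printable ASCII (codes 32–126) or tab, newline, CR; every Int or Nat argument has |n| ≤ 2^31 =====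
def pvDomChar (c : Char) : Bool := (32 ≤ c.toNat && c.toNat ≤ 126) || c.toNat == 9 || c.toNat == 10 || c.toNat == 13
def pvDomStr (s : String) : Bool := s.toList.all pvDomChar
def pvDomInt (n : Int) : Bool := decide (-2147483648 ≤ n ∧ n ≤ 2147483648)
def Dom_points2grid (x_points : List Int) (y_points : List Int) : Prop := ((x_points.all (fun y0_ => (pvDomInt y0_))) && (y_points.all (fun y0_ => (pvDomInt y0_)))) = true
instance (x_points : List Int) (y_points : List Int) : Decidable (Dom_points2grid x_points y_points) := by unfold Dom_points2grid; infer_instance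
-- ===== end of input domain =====

-- B replaces A's nested index loops with structural recursion consuming the lists two
-- elements at a time (alternative decomposition, same cost).


-- ===== PORT A =====
-- x_points[i] etc. ported as (pyGet? …).getD 0; Pre_ keeps every index in range, so the
-- default is never read on admitted inputs (Python raises IndexError exactly outside Pre_).
def points2grid (x_points : List Int) (y_points : List Int) : List (List (Int × Int × Int × Int)) :=
  (PySem.List.pyRange 0 (x_points.length : Int) 2).foldl (fun cells i =>
    (PySem.List.pyRange 0 (y_points.length : Int) 2).foldl (fun cells j =>
      cells ++ [[((PySem.List.pyGet? x_points i).getD 0, (PySem.List.pyGet? x_points (i+1)).getD 0,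
                  (PySem.List.pyGet? x_points i).getD 0, (PySem.List.pyGet? x_points (i+1)).getD 0),
                 ((PySem.List.pyGet? y_points j).getD 0, (PySem.List.pyGet? y_points j).getD 0,
                  (PySem.List.pyGet? y_points (j+1)).getD 0, (PySem.List.pyGet? y_points (j+1)).getD 0)]]) cells) []

-- ===== PORT B =====
-- 'row xt ys': one row of cells for a fixed x-tuple, eating y two at a time ('ys[2:]' = the
-- tail of the tail, exact since the guard ensures len ≥ 2); 'go': the outer recursion over x.
def pvRow (xt : Int × Int × Int × Int) : List Int → List (List (Int × Int × Int × Int))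
  | c :: d :: t => [[xt, (c, c, d, d)]] ++ pvRow xt t
  | _ => []

def pvGo (y_points : List Int) : List Int → List (List (Int × Int × Int × Int))
  | a :: b :: t => pvRow (a, b, a, b) y_points ++ pvGo y_points t
  | _ => []

def points2grid_alt (x_points : List Int) (y_points : List Int) : List (List (Int × Int × Int × Int)) :=
  pvGo y_points x_points

-- ===== PRECONDITION & SPEC =====
-- Pre_ admits exactly the inputs on which Python A returns: an odd-length side makes
-- x_points[i+1] / y_points[j+1] raise IndexError, unless the other side is empty so the
-- offending loop body never runs.  (Every excluded input makes A raise; nothing is claimed there.)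
def Pre_points2grid (x_points : List Int) (y_points : List Int) : Prop :=
  (x_points.length % 2 = 0 ∨ y_points = []) ∧ (y_points.length % 2 = 0 ∨ x_points = [])
instance (x_points : List Int) (y_points : List Int) : Decidable (Pre_points2grid x_points y_points) := by unfold Pre_points2grid; infer_instance
def pvWitness_points2grid : List Int × List Int := ([0, 1], [2, 3])

def Spec_points2grid (x_points : List Int) (y_points : List Int) (out : List (List (Int × Int × Int × Int))) : Prop := out = points2grid_alt x_points y_points
instance (x_points : List Int) (y_points : List Int) (out : List (List (Int × Int × Int × Int))) : Decidable (Spec_points2grid x_points y_points out) := by unfold Spec_points2grid; infer_instance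

-- ===== CLAIM (what is proved, stated in full; the proofs are below) =====
def Claim_equal_points2grid : Prop := ∀ (x_points : List Int) (y_points : List Int), Dom_points2grid x_points y_points → Pre_points2grid x_points y_points → Spec_points2grid x_points y_points (points2grid x_points y_points)

-- ===== LEMMAS AND PROOFS =====

def pvPairs : List Int → List (Int × Int)
  | a :: b :: t => (a, b) :: pvPairs t
  | _ => []

theorem mpPairs (l : List Int) (c : Nat) (h : l.length = 2*c) :
    (List.range c).map (fun k => (l[2*k]?.getD 0, l[2*k+1]?.getD 0)) = pvPairs l := by
  induction l using pvPairs.induct generalizing c with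
  | case2 l hne =>
    match l, hne with
    | [], _ =>
      obtain rfl : c = 0 := by simp at h; omega
      simp [pvPairs]
    | [a], _ => simp at h; omega
    | a :: b :: t, hne => exact absurd rfl (hne a b t)
  | case1 a b t ih =>
    obtain ⟨c', rfl⟩ : ∃ c', c = c' + 1 := ⟨c - 1, by simp at h; omega⟩
    simp only [List.range_succ_eq_map, List.map_cons, List.map_map]
    simp [pvPairs]
    exact ih c' (by simp at h ⊢; omega)

theorem mapPairGen {α : Type} (l : List Int) (h : l.length % 2 = 0) (g : Int × Int → α) :
    (PySem.List.pyRange 0 (l.length : Int) 2).map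
      (fun i => g ((PySem.List.pyGet? l i).getD 0, (PySem.List.pyGet? l (i+1)).getD 0)) =
    (pvPairs l).map g := by
  rw [PySem.List.pyRange_of_pos _ _ (by norm_num : (0:Int) < 2), List.map_map]
  have hfun : ((fun i => g ((PySem.List.pyGet? l i).getD 0, (PySem.List.pyGet? l (i+1)).getD 0)) ∘
      (fun k : Nat => (0:Int) + 2 * ↑k)) =
      (fun k : Nat => g (l[2*k]?.getD 0, l[2*k+1]?.getD 0)) := by
    funext k
    have e1 : (0:Int) + 2 * (k:Int) = ((2*k : Nat) : Int) := by push_cast; ring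
    have e2 : ((2*k : Nat) : Int) + 1 = ((2*k+1 : Nat) : Int) := by push_cast; ring
    simp only [Function.comp, e1, e2, PySem.List.pyGet?_natCast]
  rw [hfun]
  split
  · rw [show (fun k : Nat => g (l[2*k]?.getD 0, l[2*k+1]?.getD 0)) =
        g ∘ (fun k : Nat => (l[2*k]?.getD 0, l[2*k+1]?.getD 0)) from rfl,
      ← List.map_map, mpPairs l _ (by omega)]
  · have h0 : l = [] := List.eq_nil_of_length_eq_zero (by omega)
    subst h0; simp [pvPairs]

theorem row_eq (xt : Int × Int × Int × Int) (l : List Int) :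
    pvRow xt l = (pvPairs l).map (fun q => [xt, (q.1, q.1, q.2, q.2)]) := by
  induction l using pvPairs.induct with
  | case1 a b t ih => simp [pvRow, pvPairs, ih]
  | case2 l hne => match l, hne with
    | [], _ => simp [pvRow, pvPairs]
    | [a], _ => simp [pvRow, pvPairs]
    | a :: b :: t, h => exact absurd rfl (h a b t)

theorem go_eq (y l : List Int) :
    pvGo y l = (pvPairs l).flatMap (fun p => pvRow (p.1, p.2, p.1, p.2) y) := by
  induction l using pvPairs.induct with
  | case1 a b t ih => simp [pvGo, pvPairs, ih]
  | case2 l hne => match l, hne with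
    | [], _ => simp [pvGo, pvPairs]
    | [a], _ => simp [pvGo, pvPairs]
    | a :: b :: t, h => exact absurd rfl (h a b t)

theorem points2grid_spec : Claim_equal_points2grid := by
  intro x y _ hpre
  unfold Spec_points2grid points2grid points2grid_alt
  simp only [PySem.List.foldl_append_singleton_eq_map, PySem.List.foldl_append_eq_flatMap,
    List.nil_append, go_eq, row_eq]
  rcases hpre with ⟨hx, hy⟩
  rcases hx with hx | rfl
  · rcases hy with hy | rfl
    · -- both even
      have hyrw : ∀ xt : Int × Int × Int × Int,
          (PySem.List.pyRange 0 (y.length : Int) 2).map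
            (fun j => [xt, ((PySem.List.pyGet? y j).getD 0, (PySem.List.pyGet? y j).getD 0,
                            (PySem.List.pyGet? y (j+1)).getD 0, (PySem.List.pyGet? y (j+1)).getD 0)]) =
          (pvPairs y).map (fun q => [xt, (q.1, q.1, q.2, q.2)]) := fun xt =>
        mapPairGen y hy (fun q => [xt, (q.1, q.1, q.2, q.2)])
      simp only [hyrw]
      rw [List.flatMap_def,
        mapPairGen x hx (fun p => (pvPairs y).map (fun q => [(p.1, p.2, p.1, p.2), (q.1, q.1, q.2, q.2)])),
        ← List.flatMap_def]
    · -- x = []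
      simp [pvPairs, show PySem.List.pyRange 0 (0:Int) 2 = [] from by decide]
  · -- y = []
    have h0 : ∀ {β : Type} (l : List β),
        (l.flatMap fun _ => ([] : List (List (Int × Int × Int × Int)))) = [] := by
      intro β l; simp
    simp [pvPairs, show PySem.List.pyRange 0 (0:Int) 2 = [] from by decide]
    rw [h0, h0]
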